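-- pv_equiv track=rewrite | github.com/mateoias/trump_tweet_analysis | python_code/in_progress_new_create_word_cloud_and_scatter_plot_by_topic.py | find_relevant_tweets
-- ===== SOURCE A (Python) =====
-- def find_relevant_tweets(user_topic_words, clean_tweet_list):
-- 	relevant_tweet_list = set()
-- 	for tweet in clean_tweet_list:
-- 		for word in tweet.split(" "):
-- 			if word in user_topic_words:
-- 				relevant_tweet_list.add(tweet)
-- 				break
-- 	return relevant_tweet_list
-- ===== SOURCE B (Python) =====
-- def find_relevant_tweets(user_topic_words, clean_tweet_list):
-- 	# Inverted index: for each word, the indices of the tweets containing it.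
-- 	pairs = [(word, i) for i, tweet in enumerate(clean_tweet_list) for word in tweet.split(" ")]
-- 	index = {}
-- 	for word, i in pairs:
-- 		index.setdefault(word, []).append(i)
-- 	hits = set()
-- 	for word in user_topic_words:
-- 		hits.update(index.get(word, []))
-- 	result = set()
-- 	for i in sorted(hits):
-- 		result.add(clean_tweet_list[i])
-- 	return result
-- ===== Notes on version B (the rewrite author's own statement) =====
-- stated objective: alternative
-- what changed: Replaces A's per-tweet nested membership scan with a staged inverted-index algorithm: flatten tweets to (word, tweet-index) pairs, group them into a word-to-indices dict, look up each topic word in that dict, then rebuild the result set from the sorted hit indices.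
import Mathlib
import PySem

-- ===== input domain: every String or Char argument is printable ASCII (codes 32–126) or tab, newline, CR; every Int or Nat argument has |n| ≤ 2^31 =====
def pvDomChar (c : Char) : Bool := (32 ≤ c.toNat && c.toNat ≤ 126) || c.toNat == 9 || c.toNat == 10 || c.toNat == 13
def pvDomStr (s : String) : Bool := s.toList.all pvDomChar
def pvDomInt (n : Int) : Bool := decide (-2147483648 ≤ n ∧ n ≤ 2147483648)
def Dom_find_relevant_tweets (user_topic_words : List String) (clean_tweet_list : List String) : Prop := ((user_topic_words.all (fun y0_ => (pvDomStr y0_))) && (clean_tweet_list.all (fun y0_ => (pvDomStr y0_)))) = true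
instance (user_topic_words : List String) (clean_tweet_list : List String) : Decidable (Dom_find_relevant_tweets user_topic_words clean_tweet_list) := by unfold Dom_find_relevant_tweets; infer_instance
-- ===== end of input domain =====

-- B replaces A's nested scan by a staged inverted-index algorithm: build a word → tweet-index
-- map once, look up each topic word in it, then rebuild the tweet set from the sorted hit
-- indices — an alternative algorithm of similar cost, same result set.


-- ===== PORT A =====
-- inner 'for word in tweet.split(" "): if word in user_topic_words: add; break'
def pvInnerA (user_topic_words : List String) (tweet : String)
    (words : List String) (acc : PySem.Set String) : PySem.Set String :=
  match words with
  | [] => acc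
  | w :: ws =>
      if user_topic_words.contains w then PySem.Set.add acc tweet
      else pvInnerA user_topic_words tweet ws acc

def find_relevant_tweets (user_topic_words : List String) (clean_tweet_list : List String) : List String :=
  clean_tweet_list.foldl
    (fun acc tweet =>
      pvInnerA user_topic_words tweet ((PySem.Str.split? tweet " ").getD []) acc)
    PySem.Set.empty

-- ===== PORT B =====
-- '[(word, i) for i, tweet in enumerate(clean_tweet_list) for word in tweet.split(" ")]'
def pvPairsB (clean_tweet_list : List String) : List (String × Int) :=
  (PySem.List.enumerate clean_tweet_list 0).flatMap
    (fun p => ((PySem.Str.split? p.2 " ").getD []).map (fun w => (w, p.1)))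

def find_relevant_tweets_alt (user_topic_words : List String) (clean_tweet_list : List String) : List String :=
  -- index: built by 'index.setdefault(word, []).append(i)'  ==  modify word [] (· ++ [i])
  -- hits:  'for word in user_topic_words: hits.update(index.get(word, []))'
  -- result loop: 'for i in sorted(hits): result.add(clean_tweet_list[i])'  (every hit index is in range)
  (PySem.List.sorted
    (user_topic_words.foldl
      (fun s w =>
        PySem.Set.update s
          (((pvPairsB clean_tweet_list).foldl (fun d p => d.modify p.1 [] (· ++ [p.2]))
              PySem.Dict.empty).getD w []))
      PySem.Set.empty)
    (fun x => x) false).foldl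
    (fun s i => PySem.Set.add s (PySem.List.pyGetD clean_tweet_list i "")) PySem.Set.empty

-- ===== PRECONDITION & SPEC =====
def Spec_find_relevant_tweets (user_topic_words : List String) (clean_tweet_list : List String) (out : List String) : Prop := out = find_relevant_tweets_alt user_topic_words clean_tweet_list
instance (user_topic_words : List String) (clean_tweet_list : List String) (out : List String) : Decidable (Spec_find_relevant_tweets user_topic_words clean_tweet_list out) := by unfold Spec_find_relevant_tweets; infer_instance

-- ===== CLAIM (what is proved, stated in full; the proofs are below) =====
def Claim_equal_find_relevant_tweets : Prop := ∀ (user_topic_words : List String) (clean_tweet_list : List String), Dom_find_relevant_tweets user_topic_words clean_tweet_list → Spec_find_relevant_tweets user_topic_words clean_tweet_list (find_relevant_tweets user_topic_words clean_tweet_list)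

-- ===== LEMMAS AND PROOFS =====

-- the per-tweet match predicate both sides decide
def pvMatch (u : List String) (t : String) : Bool :=
  ((PySem.Str.split? t " ").getD []).any (fun w => u.contains w)

-- A's inner loop adds the tweet iff some word is a topic word.
theorem pvInnerA_eq (u : List String) (t : String) (ws : List String) (acc : PySem.Set String) :
    pvInnerA u t ws acc = if ws.any (fun w => u.contains w) then PySem.Set.add acc t else acc := by
  induction ws with
  | nil => simp [pvInnerA]
  | cons w ws ih =>
      simp only [pvInnerA, List.any_cons]
      by_cases h : w ∈ u
      · simp [h]
      · simp [h, ih]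

-- folding Set.add over a filtered list = folding the guarded add over the whole list.
theorem pvFoldFilter (p : String → Bool) (l : List String) (acc : PySem.Set String) :
    (l.filter p).foldl PySem.Set.add acc
      = l.foldl (fun s t => if p t then PySem.Set.add s t else s) acc := by
  induction l generalizing acc with
  | nil => rfl
  | cons x l ih =>
      by_cases h : p x = true
      · simp [h, ih]
      · simp [h, ih]

-- A computes set(filter(match, clean_tweet_list)).
theorem pvA_eq (u c : List String) :
    find_relevant_tweets u c = PySem.Set.ofList (c.filter (pvMatch u)) := by
  unfold find_relevant_tweets
  rw [PySem.Set.ofList_eq_foldl, pvFoldFilter]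
  apply PySem.List.foldl_congr_mem
  intro acc t _
  rw [pvInnerA_eq]
  rfl

-- membership in the flattened (word, index) pair list
theorem pvMem_pairs (c : List String) (w : String) (i : Int) :
    (w, i) ∈ pvPairsB c
      ↔ ∃ k : Nat, k < c.length ∧ i = (k : Int)
          ∧ w ∈ (PySem.Str.split? (c.getD k "") " ").getD [] := by
  unfold pvPairsB
  simp only [List.mem_flatMap, List.mem_map, Prod.mk.injEq]
  constructor
  · rintro ⟨p, hp, w', hw', rfl, rfl⟩
    rw [PySem.List.mem_enumerate_iff] at hp
    obtain ⟨k, hk, rfl⟩ := hp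
    exact ⟨k, hk, by simp, by rwa [List.getD_eq_getElem _ _ hk]⟩
  · rintro ⟨k, hk, rfl, hw⟩
    refine ⟨((k : Int), c.getD k ""), ?_, w, hw, rfl, rfl⟩
    rw [PySem.List.mem_enumerate_iff]
    exact ⟨k, hk, by simp [List.getElem?_eq_getElem hk]⟩

-- membership in the hit-index set
theorem pvMem_hits (u c : List String) (i : Int) :
    i ∈ u.foldl (fun s w =>
        PySem.Set.update s
          (((pvPairsB c).foldl (fun d p => d.modify p.1 [] (· ++ [p.2])) PySem.Dict.empty).getD w []))
        PySem.Set.empty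
      ↔ ∃ k : Nat, k < c.length ∧ i = (k : Int) ∧ pvMatch u (c.getD k "") = true := by
  have hmemidx : ∀ w : String,
      (i ∈ ((pvPairsB c).foldl (fun d p => d.modify p.1 [] (· ++ [p.2]))
        PySem.Dict.empty).getD w []) ↔ (w, i) ∈ pvPairsB c := by
    intro w
    rw [PySem.Dict.getD_foldl_modify_append, PySem.Dict.getD_empty]
    simp only [List.nil_append, List.mem_map, List.mem_filter]
    constructor
    · rintro ⟨p, ⟨hp, he⟩, rfl⟩
      rwa [show p = (w, p.2) from Prod.ext (by simpa using he) rfl] at hp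
    · intro hp
      exact ⟨(w, i), ⟨hp, by simp⟩, rfl⟩
  have hfold : ∀ (l : List String) (s : PySem.Set Int),
      i ∈ l.foldl (fun s w =>
        PySem.Set.update s
          (((pvPairsB c).foldl (fun d p => d.modify p.1 [] (· ++ [p.2])) PySem.Dict.empty).getD w [])) s
      ↔ i ∈ s ∨ ∃ w ∈ l, (w, i) ∈ pvPairsB c := by
    intro l
    induction l with
    | nil => intro s; simp
    | cons w l ih =>
        intro s
        rw [List.foldl_cons, ih, PySem.Set.mem_update, hmemidx]
        simp only [List.mem_cons]
        constructor
        · rintro (⟨hs | hp⟩ | ⟨w', hw', hp⟩)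
          · exact Or.inl hs
          · exact Or.inr ⟨w, Or.inl rfl, hp⟩
          · exact Or.inr ⟨w', Or.inr hw', hp⟩
        · rintro (hs | ⟨w', (rfl | hw'), hp⟩)
          · exact Or.inl (Or.inl hs)
          · exact Or.inl (Or.inr hp)
          · exact Or.inr ⟨w', hw', hp⟩
  rw [hfold]
  simp only [PySem.Set.empty, List.not_mem_nil, false_or]
  constructor
  · rintro ⟨w, hw, hp⟩
    rw [pvMem_pairs] at hp
    obtain ⟨k, hk, rfl, hmem⟩ := hp
    exact ⟨k, hk, rfl, by
      simp only [pvMatch, List.any_eq_true]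
      exact ⟨w, hmem, by simpa using hw⟩⟩
  · rintro ⟨k, hk, rfl, hm⟩
    simp only [pvMatch, List.any_eq_true] at hm
    obtain ⟨w, hw, hu⟩ := hm
    exact ⟨w, by simpa using hu, (pvMem_pairs c w k).mpr ⟨k, hk, rfl, hw⟩⟩

-- the hit set has no duplicates (it is built with set operations)
theorem pvHits_nodup (u : List String) (f : String → List Int) :
    (u.foldl (fun s w => PySem.Set.update s (f w)) PySem.Set.empty).Nodup := by
  have h : ∀ (s : PySem.Set Int), s.Nodup →
      (u.foldl (fun s w => PySem.Set.update s (f w)) s).Nodup := by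
    induction u with
    | nil => intro s hs; exact hs
    | cons w l ih => intro s hs; exact ih _ (PySem.Set.nodup_update _ _ hs)
  exact h _ (by simp [PySem.Set.empty])

-- mapping the kept range indices back through the list is exactly List.filter
theorem pvRangeFilterMap (p : String → Bool) (c : List String) :
    ((List.range c.length).filter (fun k => p (c.getD k ""))).map (fun k => c.getD k "")
      = c.filter p := by
  induction c using List.reverseRecOn with
  | nil => rfl
  | append_singleton cs x ih =>
      rw [List.length_append, List.length_singleton, List.range_succ]
      have hgd : ∀ k, k < cs.length → (cs ++ [x]).getD k "" = cs.getD k "" := by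
        intro k hk
        simp [List.getD, List.getElem?_append_left hk]
      have hx : (cs ++ [x]).getD cs.length "" = x := by
        simp [List.getD]
      rw [List.filter_append, List.map_append,
        show (List.range cs.length).filter (fun k => p ((cs ++ [x]).getD k ""))
            = (List.range cs.length).filter (fun k => p (cs.getD k "")) from
          List.filter_congr (by intro k hk; rw [hgd k (List.mem_range.mp hk)]),
        show ((List.range cs.length).filter (fun k => p (cs.getD k ""))).map
              (fun k => (cs ++ [x]).getD k "")
            = ((List.range cs.length).filter (fun k => p (cs.getD k ""))).map
              (fun k => cs.getD k "") from
          List.map_congr_left (by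
            intro k hk
            exact hgd k (List.mem_range.mp (List.mem_of_mem_filter hk))),
        ih]
      by_cases hpx : p x = true
      · simp [hpx]
      · simp [hpx]

-- ===== VERDICT (by name: the statement is the Claim_ definition above) =====
theorem find_relevant_tweets_spec : Claim_equal_find_relevant_tweets := by
  intro u c _
  unfold Spec_find_relevant_tweets find_relevant_tweets_alt
  rw [pvA_eq]
  -- the canonical strictly increasing list of matching indices
  have hpw : (((List.range c.length).filter (fun k => pvMatch u (c.getD k ""))).map
      (fun k : Nat => (k : Int))).Pairwise (· < ·) :=
    List.Pairwise.map _ (fun a b h => by exact_mod_cast h)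
      (List.Pairwise.filter _ List.pairwise_lt_range)
  have hsorted :
      PySem.List.sorted
        (u.foldl (fun s w =>
          PySem.Set.update s
            (((pvPairsB c).foldl (fun d p => d.modify p.1 [] (· ++ [p.2])) PySem.Dict.empty).getD w []))
          PySem.Set.empty) (fun x => x) false
      = ((List.range c.length).filter (fun k => pvMatch u (c.getD k ""))).map
          (fun k : Nat => (k : Int)) := by
    apply PySem.List.sorted_eq_of_perm_of_pairwise_lt
    · rw [List.perm_ext_iff_of_nodup
        (List.Pairwise.imp (fun h => ne_of_lt h) hpw) (pvHits_nodup u _)]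
      intro i
      rw [pvMem_hits]
      simp only [List.mem_map, List.mem_filter, List.mem_range]
      constructor
      · rintro ⟨k, ⟨hk, hm⟩, rfl⟩
        exact ⟨k, hk, rfl, hm⟩
      · rintro ⟨k, hk, rfl, hm⟩
        exact ⟨k, ⟨hk, hm⟩, rfl⟩
    · exact hpw
  rw [hsorted, ← PySem.Set.update_map_eq_foldl_add, PySem.Set.update_empty,
    List.map_map,
    show ((fun i : Int => PySem.List.pyGetD c i "") ∘ fun k : Nat => (k : Int))
        = fun k : Nat => c.getD k "" from
      funext (fun k => by simp [PySem.List.pyGetD_natCast]),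
    pvRangeFilterMap]
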